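-- pv_equiv track=rewrite | github.com/Kolby11/Advent-Of-Code-2022 | Day 6/solution.py | Part1
-- ===== SOURCE A (Python) =====
-- def Part1(data):
--     data=data[0]
--     #process input
--     for i in range(len(data)):
--         marker=data[i:i+4]
--         for index,m in enumerate(marker):
--             if marker.count(m)>1:
--                 break
--             if index==3:
--                 return i+4
-- ===== SOURCE B (Python) =====
-- def Part1(data):
--     s = data[0]
--     last = {}   # char -> index of its last occurrence so far
--     start = 0   # left edge of the longest duplicate-free window ending at j
--     for j, ch in enumerate(s):
--         p = last.get(ch, -1)
--         if p >= start:
--             start = p + 1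
--         last[ch] = j
--         if j - start >= 3:
--             return j + 1
--     return None
-- ===== Notes on version B (the rewrite author's own statement) =====
-- stated objective: alternative
-- what changed: Replaces the per-position slice+count rescan with a single pass that tracks each character's last occurrence in a dict and slides the left edge of the duplicate-free window, returning once the window length reaches 4.
import Mathlib
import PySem

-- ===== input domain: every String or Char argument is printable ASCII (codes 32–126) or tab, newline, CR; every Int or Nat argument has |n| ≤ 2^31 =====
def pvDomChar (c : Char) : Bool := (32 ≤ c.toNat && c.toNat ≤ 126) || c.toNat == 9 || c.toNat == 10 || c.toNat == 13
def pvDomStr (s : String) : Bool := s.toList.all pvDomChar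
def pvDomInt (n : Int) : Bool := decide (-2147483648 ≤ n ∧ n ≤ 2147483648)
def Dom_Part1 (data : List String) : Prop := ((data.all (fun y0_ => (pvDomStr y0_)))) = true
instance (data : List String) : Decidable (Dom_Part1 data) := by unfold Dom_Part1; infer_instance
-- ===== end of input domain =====

-- B replaces A's per-position slice+count rescan by one pass tracking last occurrences in a
-- dict and sliding the left edge of the duplicate-free window (objective: alternative algorithm).
-- Both ports work on the string's character list; Python's str slicing/enumerate/count of a
-- single character are exact on the char list.

-- ===== PORT A =====
-- inner 'for index, m in enumerate(marker)' loop: break on a repeated char, success at index 3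
def pvInnerA (marker : List Char) : List (Int × Char) → Bool
  | [] => false
  | (index, m) :: rest =>
    if marker.count m > 1 then false
    else if index == 3 then true
    else pvInnerA marker rest

-- outer 'for i in range(len(data))' loop
def pvOuterA (s : List Char) : List Int → Option Int
  | [] => none
  | i :: rest =>
    let marker := PySem.List.slice s (some i) (some (i + 4))
    if pvInnerA marker (PySem.List.enumerate marker 0) then some (i + 4)
    else pvOuterA s rest

def Part1 (data : List String) : Option Int :=
  match data with
  | [] => none  -- Python raises IndexError here; excluded by Pre_Part1
  | d :: _ => pvOuterA d.toList (PySem.List.pyRange 0 (d.toList.length : Int) 1)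

-- ===== PORT B =====
-- single pass: j is the enumerate index, last maps a char to its last occurrence index,
-- start is the left edge of the longest duplicate-free window ending just before j
def pvLoopB : List Char → Int → PySem.Dict Char Int → Int → Option Int
  | [], _, _, _ => none
  | ch :: rest, j, last, start =>
    let p := last.getD ch (-1)
    let start' := if p ≥ start then p + 1 else start
    let last' := last.insert ch j
    if j - start' ≥ 3 then some (j + 1)
    else pvLoopB rest (j + 1) last' start'

def Part1_alt (data : List String) : Option Int :=
  match data with
  | [] => none  -- Python raises IndexError here; excluded by Pre_Part1
  | d :: _ => pvLoopB d.toList 0 PySem.Dict.empty 0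

-- ===== PRECONDITION & SPEC =====
-- Pre_ excludes only the empty list, on which A's 'data[0]' raises IndexError.
def Pre_Part1 (data : List String) : Prop := data ≠ []
instance (data : List String) : Decidable (Pre_Part1 data) := by unfold Pre_Part1; infer_instance
def pvWitness_Part1 : List String := (["abcd"])

def Spec_Part1 (data : List String) (out : Option Int) : Prop := out = Part1_alt data
instance (data : List String) (out : Option Int) : Decidable (Spec_Part1 data out) := by unfold Spec_Part1; infer_instance

-- ===== CLAIM (what is proved, stated in full; the proofs are below) =====
def Claim_equal_Part1 : Prop := ∀ (data : List String), Dom_Part1 data → Pre_Part1 data → Spec_Part1 data (Part1 data)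

-- ===== LEMMAS AND PROOFS =====

-- common specification: first i with a 4-long duplicate-free window starting at i, as i+4
def firstWin (s : List Char) (i : Nat) : Option Int :=
  if h : i < s.length then
    (if i + 4 ≤ s.length ∧ ((s.drop i).take 4).Nodup then some ((i : Int) + 4)
     else firstWin s (i + 1))
  else none
termination_by s.length - i

-- last index of c among s[0..j-1], or -1
def lastIdx (s : List Char) : Nat → Char → Int
  | 0, _ => -1
  | j + 1, c => if s[j]? = some c then (j : Int) else lastIdx s j c

-- left edge of the longest duplicate-free window ending at j-1 (B's 'start' after j steps)
def Mst (s : List Char) : Nat → Int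
  | 0 => 0
  | j + 1 =>
    match s[j]? with
    | some c => if lastIdx s j c ≥ Mst s j then lastIdx s j c + 1 else Mst s j
    | none => Mst s j

-- the window of chars s[b..j-1]
def Wnd (s : List Char) (b j : Nat) : List Char := (s.drop b).take (j - b)

theorem lastIdx_lt (s : List Char) (j : Nat) (c : Char) : lastIdx s j c < (j : Int) := by
  induction j with
  | zero => simp [lastIdx]
  | succ j ih =>
    simp only [lastIdx]
    split
    · push_cast; omega
    · have := ih; push_cast; omega

theorem le_lastIdx_iff (s : List Char) (j b : Nat) (c : Char) :
    (b : Int) ≤ lastIdx s j c ↔ ∃ k, b ≤ k ∧ k < j ∧ s[k]? = some c := by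
  induction j with
  | zero =>
    simp only [lastIdx]
    constructor
    · intro h; omega
    · rintro ⟨k, _, hk, _⟩; omega
  | succ j ih =>
    simp only [lastIdx]
    split
    · rename_i hj
      constructor
      · intro h
        exact ⟨j, by exact_mod_cast h, by omega, hj⟩
      · rintro ⟨k, hbk, hk, _⟩
        have hbj : b ≤ j := by omega
        exact_mod_cast hbj
    · rename_i hj
      rw [ih]
      constructor
      · rintro ⟨k, hbk, hk, hc⟩; exact ⟨k, hbk, by omega, hc⟩
      · rintro ⟨k, hbk, hk, hc⟩
        refine ⟨k, hbk, ?_, hc⟩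
        rcases Nat.lt_succ_iff_lt_or_eq.mp hk with h | h
        · exact h
        · subst h; exact absurd hc hj

theorem Mst_nonneg (s : List Char) (j : Nat) : 0 ≤ Mst s j := by
  induction j with
  | zero => simp [Mst]
  | succ j ih =>
    simp only [Mst]
    split
    · split <;> omega
    · exact ih

theorem Mst_le (s : List Char) (j : Nat) : Mst s j ≤ (j : Int) := by
  induction j with
  | zero => simp [Mst]
  | succ j ih =>
    simp only [Mst]
    split
    · rename_i c _
      have := lastIdx_lt s j c
      split <;> (push_cast; omega)
    · push_cast; omega

theorem mem_Wnd (s : List Char) (b j : Nat) (c : Char) :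
    c ∈ Wnd s b j ↔ ∃ k, b ≤ k ∧ k < j ∧ s[k]? = some c := by
  unfold Wnd
  rw [List.mem_iff_getElem?]
  constructor
  · rintro ⟨t, ht⟩
    rw [List.getElem?_take] at ht
    split at ht
    · rw [List.getElem?_drop] at ht
      exact ⟨b + t, by omega, by omega, ht⟩
    · simp at ht
  · rintro ⟨k, hbk, hkj, hc⟩
    refine ⟨k - b, ?_⟩
    rw [List.getElem?_take, if_pos (by omega), List.getElem?_drop]
    rwa [show b + (k - b) = k by omega]

theorem Wnd_succ (s : List Char) (b j : Nat) (hj : j < s.length) (hb : b ≤ j) :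
    Wnd s b (j + 1) = Wnd s b j ++ [s[j]] := by
  unfold Wnd
  rw [show j + 1 - b = (j - b) + 1 by omega, List.take_add_one]
  congr 1
  rw [List.getElem?_drop, show b + (j - b) = j by omega]
  simp [List.getElem?_eq_getElem hj]

theorem nodup_Wnd_iff (s : List Char) (j : Nat) (hj : j ≤ s.length) (b : Nat) :
    (Wnd s b j).Nodup ↔ Mst s j ≤ (b : Int) := by
  induction j generalizing b with
  | zero => simp [Wnd, Mst]
  | succ j ih =>
    have hlt : j < s.length := by omega
    by_cases hb : b ≤ j
    · rw [Wnd_succ s b j hlt hb, List.nodup_append]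
      have hmem : s[j] ∈ Wnd s b j ↔ (b : Int) ≤ lastIdx s j s[j] := by
        rw [mem_Wnd, le_lastIdx_iff]
      have hM : Mst s (j + 1) =
          if lastIdx s j s[j] ≥ Mst s j then lastIdx s j s[j] + 1 else Mst s j := by
        simp only [Mst, List.getElem?_eq_getElem hlt]
      rw [hM, ih (by omega)]
      constructor
      · rintro ⟨h1, -, h2⟩
        have : ¬ ((b : Int) ≤ lastIdx s j s[j]) := fun hc =>
          h2 _ (hmem.mpr hc) s[j] (by simp) rfl
        split <;> omega
      · intro h
        have hnd : Mst s j ≤ (b : Int) := by split at h <;> omega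
        have hni : ¬ ((b : Int) ≤ lastIdx s j s[j]) := by split at h <;> omega
        refine ⟨hnd, List.nodup_singleton _, ?_⟩
        intro a ha x hx
        rw [List.mem_singleton] at hx
        subst hx
        exact fun heq => hni (hmem.mp (heq ▸ ha))
    · have h0 : j + 1 - b = 0 := by omega
      have hle := Mst_le s (j + 1)
      simp only [Wnd, h0, List.take_zero, List.nodup_nil, true_iff]
      omega

theorem firstWin_none (s : List Char) (i : Nat) (h : s.length < i + 4) : firstWin s i = none := by
  rw [firstWin]
  split
  · rename_i hlt
    rw [if_neg (by omega)]
    exact firstWin_none s (i + 1) (by omega)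
  · rfl
termination_by s.length - i

theorem loopB_eq_firstWin (s : List Char) (jn : Nat) (d : PySem.Dict Char Int)
    (hj : jn ≤ s.length) (hd : ∀ c, d.getD c (-1) = lastIdx s jn c) :
    pvLoopB (s.drop jn) (jn : Int) d (Mst s jn) = firstWin s (jn - 3) := by
  rcases Nat.lt_or_ge jn s.length with hlt | hge
  · rw [List.drop_eq_getElem_cons hlt]
    simp only [pvLoopB, hd s[jn]]
    have hM : Mst s (jn + 1) =
        if lastIdx s jn s[jn] ≥ Mst s jn then lastIdx s jn s[jn] + 1 else Mst s jn := by
      simp only [Mst, List.getElem?_eq_getElem hlt]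
    rw [← hM]
    have hnn := Mst_nonneg s (jn + 1)
    by_cases hg : (jn : Int) - Mst s (jn + 1) ≥ 3
    · rw [if_pos hg]
      have h3 : 3 ≤ jn := by omega
      have hcond : Mst s (jn + 1) ≤ ((jn - 3 : Nat) : Int) := by
        have : ((jn - 3 : Nat) : Int) = (jn : Int) - 3 := by omega
        omega
      have hnd : ((s.drop (jn - 3)).take 4).Nodup := by
        have hW := (nodup_Wnd_iff s (jn + 1) (by omega) (jn - 3)).mpr hcond
        rwa [Wnd, show jn + 1 - (jn - 3) = 4 by omega] at hW
      rw [firstWin, dif_pos (by omega : jn - 3 < s.length),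
        if_pos ⟨by omega, hnd⟩]
      congr 1
      omega
    · rw [if_neg hg]
      have hd' : ∀ c, (d.insert s[jn] (jn : Int)).getD c (-1) = lastIdx s (jn + 1) c := by
        intro c
        rw [PySem.Dict.getD_insert]
        simp only [lastIdx, List.getElem?_eq_getElem hlt, Option.some.injEq]
        rcases eq_or_ne c s[jn] with hc | hc
        · subst hc; simp
        · rw [if_neg hc, if_neg (Ne.symm hc), hd]
      have hrec := loopB_eq_firstWin s (jn + 1) (d.insert s[jn] (jn : Int)) (by omega) hd'
      rw [show ((jn : Int) + 1) = ((jn + 1 : Nat) : Int) by push_cast; rfl, hrec]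
      by_cases h3 : 3 ≤ jn
      · have hi : jn + 1 - 3 = (jn - 3) + 1 := by omega
        have hnotnd : ¬ ((s.drop (jn - 3)).take 4).Nodup := by
          intro hnd
          have := (nodup_Wnd_iff s (jn + 1) (by omega) (jn - 3)).mp
            (by rwa [Wnd, show jn + 1 - (jn - 3) = 4 by omega])
          have hcast : ((jn - 3 : Nat) : Int) = (jn : Int) - 3 := by omega
          omega
        rw [hi]
        conv_rhs => rw [firstWin]
        rw [dif_pos (by omega : jn - 3 < s.length),
          if_neg (by intro h; exact hnotnd h.2)]
      · congr 1
        omega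
  · have hjn : jn = s.length := by omega
    rw [List.drop_eq_nil_of_le hge]
    simp only [pvLoopB]
    rw [firstWin_none s (jn - 3) (by omega)]
termination_by s.length - jn

theorem innerA_iff (marker : List Char) (hlen : marker.length ≤ 4) :
    pvInnerA marker (PySem.List.enumerate marker 0) = true ↔
      marker.length = 4 ∧ marker.Nodup := by
  match marker with
  | [] => simp [pvInnerA, PySem.List.enumerate_nil]
  | [a] =>
    simp only [PySem.List.enumerate_cons, PySem.List.enumerate_nil, pvInnerA]
    split_ifs <;> simp_all
  | [a, b] =>
    simp only [PySem.List.enumerate_cons, PySem.List.enumerate_nil, pvInnerA]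
    split_ifs <;> simp_all
  | [a, b, c] =>
    simp only [PySem.List.enumerate_cons, PySem.List.enumerate_nil, pvInnerA]
    split_ifs <;> simp_all
  | a :: b :: c :: d :: rest =>
    have hr : rest = [] := List.length_eq_zero_iff.mp (by simp at hlen; omega)
    subst hr
    simp only [PySem.List.enumerate_cons, PySem.List.enumerate_nil, pvInnerA]
    rw [List.nodup_iff_count_le_one]
    norm_num
    constructor
    · rintro ⟨⟨h1, h2, h3⟩, hb, hc, hd⟩
      intro x
      by_cases hx : x ∈ [a, b, c, d]
      · simp only [List.mem_cons, List.not_mem_nil, or_false] at hx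
        rcases hx with rfl | rfl | rfl | rfl
        · simp [List.count_cons]
          exact ⟨⟨fun h => h3 h.symm, fun h => h2 h.symm⟩, fun h => h1 h.symm⟩
        · exact hb
        · exact hc
        · exact hd
      · rw [List.count_eq_zero_of_not_mem hx]; omega
    · intro hcnt
      refine ⟨⟨?_, ?_, ?_⟩, hcnt b, hcnt c, hcnt d⟩
      · intro heq; subst heq; have := hcnt a; simp [List.count_cons] at this
      · intro heq; subst heq; have := hcnt a; simp [List.count_cons] at this
      · intro heq; subst heq; have := hcnt a; simp [List.count_cons] at this

theorem outerA_eq_firstWin (s : List Char) (i : Nat) (hi : i ≤ s.length) :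
    pvOuterA s (PySem.List.pyRange (i : Int) (s.length : Int) 1) = firstWin s i := by
  rcases Nat.lt_or_ge i s.length with hlt | hge
  · rw [PySem.List.pyRange_one_cons (by exact_mod_cast hlt)]
    simp only [pvOuterA]
    have hm : PySem.List.slice s (some (i : Int)) (some ((i : Int) + 4)) = (s.drop i).take 4 := by
      have := PySem.List.slice_natCast_add (xs := s) (j := i) (n := 4)
      exact_mod_cast this
    rw [hm]
    have hlen : ((s.drop i).take 4).length ≤ 4 := by simp
    have hlen4 : ((s.drop i).take 4).length = 4 ↔ i + 4 ≤ s.length := by simp; omega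
    rw [firstWin, dif_pos hlt]
    by_cases hg : pvInnerA ((s.drop i).take 4)
        (PySem.List.enumerate ((s.drop i).take 4) 0) = true
    · obtain ⟨hl, hn⟩ := (innerA_iff _ hlen).mp hg
      rw [if_pos hg, if_pos ⟨hlen4.mp hl, hn⟩]
    · have hrec := outerA_eq_firstWin s (i + 1) (by omega)
      rw [if_neg hg, if_neg (by rintro ⟨h1, h2⟩; exact hg ((innerA_iff _ hlen).mpr ⟨hlen4.mpr h1, h2⟩)),
        show ((i : Int) + 1) = ((i + 1 : Nat) : Int) by push_cast; rfl, hrec]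
  · have : i = s.length := by omega
    subst this
    rw [PySem.List.pyRange_one_eq_nil (by omega)]
    simp only [pvOuterA]
    rw [firstWin, dif_neg (by omega)]
termination_by s.length - i

-- ===== VERDICT (by name: the statement is the Claim_ definition above) =====
theorem Part1_spec : Claim_equal_Part1 := by
  intro data _ hpre
  match data with
  | [] => exact absurd rfl hpre
  | d :: rest =>
    show Part1 (d :: rest) = Part1_alt (d :: rest)
    have hA : Part1 (d :: rest) = firstWin d.toList 0 := by
      simpa [Part1] using outerA_eq_firstWin d.toList 0 (by omega)
    have hB : Part1_alt (d :: rest) = firstWin d.toList 0 := by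
      have := loopB_eq_firstWin d.toList 0 PySem.Dict.empty (by omega)
        (by intro c; simp [PySem.Dict.getD_empty, lastIdx])
      simpa [Part1_alt, Mst] using this
    rw [hA, hB]
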